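-- pv_equiv track=rewrite | github.com/MathewKJ2048/to_do_list | src/render.py | append_col
-- ===== SOURCE A (Python) =====
-- def append_col(c1,c2,offset):
-- 	if c1 == []:
-- 		return c2
-- 	if c2 == []:
-- 		return c1
-- 	N = max(len(c1),len(c2)+offset)
-- 	empty_1 = " "*len(c1[0])
-- 	empty_2 = " "*len(c2[0])
-- 	for i in range(offset):
-- 		c2 = [empty_2]+c2
-- 	while len(c2)!=N:
-- 		c2.append(empty_2)
-- 	while len(c1)!=N:
-- 		c1.append(empty_1)
-- 	result = [""]*N
-- 	for i in range(N):
-- 		result[i]+=c1[i]+c2[i]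
-- 	return result
-- ===== SOURCE B (Python) =====
-- def append_col(c1, c2, offset):
--     if c1 == []:
--         return c2
--     if c2 == []:
--         return c1
--     eff = max(offset, 0)
--     N = max(len(c1), len(c2) + offset)
--     e1 = " " * len(c1[0])
--     e2 = " " * len(c2[0])
--     return [(c1[i] if i < len(c1) else e1)
--             + (c2[i - eff] if eff <= i < eff + len(c2) else e2)
--             for i in range(N)]
-- ===== Notes on version B (the rewrite author's own statement) =====
-- stated objective: simpler
-- what changed: B replaces A's four mutation passes (prepend loop, two while-padding loops, and an in-place += loop over a preallocated list) with a single index-based comprehension that selects each row's left/right piece arithmetically; B does not mutate the caller's c1 (A extends it in place). Pre_ excludes only inputs where A never returns: offset<0 with both columns nonempty and len(c2)>len(c1), where A's second while loop runs forever.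
import Mathlib
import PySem

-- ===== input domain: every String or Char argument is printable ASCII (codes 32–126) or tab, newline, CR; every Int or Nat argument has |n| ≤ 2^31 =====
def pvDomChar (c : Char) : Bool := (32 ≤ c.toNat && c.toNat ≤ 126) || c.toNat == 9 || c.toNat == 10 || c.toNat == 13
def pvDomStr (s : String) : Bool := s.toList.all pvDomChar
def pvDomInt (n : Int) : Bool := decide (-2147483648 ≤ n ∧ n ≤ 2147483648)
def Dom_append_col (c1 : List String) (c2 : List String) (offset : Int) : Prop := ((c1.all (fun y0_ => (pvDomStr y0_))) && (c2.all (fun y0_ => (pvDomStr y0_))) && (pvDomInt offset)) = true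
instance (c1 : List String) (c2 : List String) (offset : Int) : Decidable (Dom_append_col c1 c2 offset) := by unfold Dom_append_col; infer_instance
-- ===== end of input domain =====

-- B builds the row list in ONE index-based pass instead of A's four mutation passes; equivalence is about the
-- RETURN value only: Python A extends the caller's c1 in place, Python B performs no mutation.

-- ===== PORT A =====
-- Python's `while len(xs) != N: xs.append(e)`: under Pre_ we always have len(xs) ≤ N at this point, where the
-- `!=` loop is exactly "append while the length is < N" — this recursion is exact there (outside, Python diverges).
def pvPadWhile (e : String) (N : Int) (xs : List String) : List String :=
  if _h : (xs.length : Int) < N then pvPadWhile e N (xs ++ [e]) else xs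
termination_by (N - xs.length).toNat
decreasing_by simp; omega

def append_col (c1 : List String) (c2 : List String) (offset : Int) : List String :=
  if c1 = [] then c2
  else if c2 = [] then c1
  else
    let N : Int := max (c1.length : Int) ((c2.length : Int) + offset)
    -- " " * len(c1[0]) : a run of that many spaces (exact: '*' on the one-char string " ")
    let empty1 : String := String.ofList (List.replicate (PySem.Str.len (PySem.List.pyGetD c1 0 "")).toNat ' ')
    let empty2 : String := String.ofList (List.replicate (PySem.Str.len (PySem.List.pyGetD c2 0 "")).toNat ' ')
    let c2a := (PySem.List.pyRange 0 offset 1).foldl (fun acc _ => [empty2] ++ acc) c2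
    let c2b := pvPadWhile empty2 N c2a
    let c1b := pvPadWhile empty1 N c1
    let result := List.replicate N.toNat ""
    (PySem.List.pyRange 0 N 1).foldl
      (fun r i => r.set i.toNat
        ((PySem.List.pyGetD r i "" ++ PySem.List.pyGetD c1b i "") ++ PySem.List.pyGetD c2b i ""))
      result

-- ===== PORT B =====
def append_col_alt (c1 : List String) (c2 : List String) (offset : Int) : List String :=
  if c1 = [] then c2
  else if c2 = [] then c1
  else
    let eff : Int := max offset 0
    let N : Int := max (c1.length : Int) ((c2.length : Int) + offset)
    let e1 : String := String.ofList (List.replicate (PySem.Str.len (PySem.List.pyGetD c1 0 "")).toNat ' ')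
    let e2 : String := String.ofList (List.replicate (PySem.Str.len (PySem.List.pyGetD c2 0 "")).toNat ' ')
    (PySem.List.pyRange 0 N 1).map (fun i =>
      (if i < (c1.length : Int) then PySem.List.pyGetD c1 i "" else e1) ++
      (if eff ≤ i ∧ i < eff + (c2.length : Int) then PySem.List.pyGetD c2 (i - eff) "" else e2))

-- ===== PRECONDITION & SPEC =====
-- Pre_ excludes exactly the inputs on which A never RETURNS: with both columns nonempty, a negative offset and
-- len(c2) > len(c1), A's `while len(c2)!=N` loop appends forever (len(c2) already exceeds N).
def Pre_append_col (c1 : List String) (c2 : List String) (offset : Int) : Prop :=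
  c1 = [] ∨ c2 = [] ∨ 0 ≤ offset ∨ c2.length ≤ c1.length
instance (c1 : List String) (c2 : List String) (offset : Int) : Decidable (Pre_append_col c1 c2 offset) := by unfold Pre_append_col; infer_instance

def pvWitness_append_col : List String × List String × Int := (["ab", "c"], ["xy"], 1)

def Spec_append_col (c1 : List String) (c2 : List String) (offset : Int) (out : List String) : Prop := out = append_col_alt c1 c2 offset
instance (c1 : List String) (c2 : List String) (offset : Int) (out : List String) : Decidable (Spec_append_col c1 c2 offset out) := by unfold Spec_append_col; infer_instance

-- ===== CLAIM (what is proved, stated in full; the proofs are below) =====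
def Claim_equal_append_col : Prop := ∀ (c1 : List String) (c2 : List String) (offset : Int), Dom_append_col c1 c2 offset → Pre_append_col c1 c2 offset → Spec_append_col c1 c2 offset (append_col c1 c2 offset)

-- ===== LEMMAS AND PROOFS =====

lemma pv_empty_append (s : String) : "" ++ s = s := by
  cases s
  rfl

-- the prepend loop builds `replicate l.length e ++ xs`
lemma pv_foldl_cons_const {α β : Type} (e : α) :
    ∀ (l : List β) (xs : List α), l.foldl (fun acc _ => [e] ++ acc) xs = List.replicate l.length e ++ xs := by
  intro l
  induction l with
  | nil => intro xs; simp
  | cons b l ih =>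
    intro xs
    simp only [List.foldl, List.length_cons, List.replicate_succ']
    rw [ih]
    simp

-- the while-padding loop appends up to length N
lemma pvPadWhile_eq (e : String) (N : Int) (xs : List String) :
    pvPadWhile e N xs = xs ++ List.replicate (N - xs.length).toNat e := by
  generalize hf : (N - (xs.length : Int)).toNat = f
  induction f generalizing xs with
  | zero =>
    rw [pvPadWhile, dif_neg (by omega)]
    simp only [show (N - (xs.length : Int)).toNat = 0 from hf, List.replicate_zero, List.append_nil]
  | succ f ih =>
    rw [pvPadWhile, dif_pos (by omega)]
    rw [ih (xs ++ [e]) (by simp; omega)]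
    simp [List.replicate_succ, List.append_assoc]

-- the in-place `result[i] += …` loop over range(N), characterised elementwise
lemma pv_foldl_set (f1 f2 : Int → String) (N : Int) :
    ∀ (a : Nat) (r : List String), r.length = N.toNat →
      (∀ k : Nat, a ≤ k → k < N.toNat → r[k]? = some "") →
      ((PySem.List.pyRange (a : Int) N 1).foldl
        (fun r i => r.set i.toNat ((PySem.List.pyGetD r i "" ++ f1 i) ++ f2 i)) r).length = N.toNat ∧
      ∀ k : Nat, ((PySem.List.pyRange (a : Int) N 1).foldl
        (fun r i => r.set i.toNat ((PySem.List.pyGetD r i "" ++ f1 i) ++ f2 i)) r)[k]? =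
        if a ≤ k ∧ k < N.toNat then some (("" ++ f1 (k : Int)) ++ f2 (k : Int)) else r[k]? := by
  intro a
  generalize hf : N.toNat - a = f
  induction f generalizing a with
  | zero =>
    intro r hlen _
    rw [PySem.List.pyRange_one_eq_nil (by omega)]
    refine ⟨hlen, ?_⟩
    intro k
    rw [List.foldl_nil, if_neg (by omega)]
  | succ f ih =>
    intro r hlen hinit
    have ha : (a : Int) < N := by omega
    rw [PySem.List.pyRange_one_cons ha]
    simp only [List.foldl_cons]
    have hstep : r.set (a : Int).toNat ((PySem.List.pyGetD r (a : Int) "" ++ f1 (a : Int)) ++ f2 (a : Int))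
        = r.set a (("" ++ f1 (a : Int)) ++ f2 (a : Int)) := by
      have hra : r[a]? = some "" := hinit a le_rfl (by omega)
      have : PySem.List.pyGetD r (a : Int) "" = "" := by
        rw [PySem.List.pyGetD_natCast, List.getD_eq_getElem?_getD, hra]
        rfl
      rw [this]
      simp
    rw [hstep]
    have hcast : (a : Int) + 1 = ((a + 1 : Nat) : Int) := by push_cast; ring
    rw [hcast]
    obtain ⟨ihlen, ihget⟩ := ih (a + 1) (by omega) (r.set a (("" ++ f1 (a : Int)) ++ f2 (a : Int)))
      (by simp [hlen])
      (by
        intro k hk1 hk2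
        rw [List.getElem?_set_ne (by omega)]
        exact hinit k (by omega) hk2)
    refine ⟨ihlen, ?_⟩
    intro k
    rw [ihget k]
    by_cases hk1 : a + 1 ≤ k
    · by_cases hk2 : k < N.toNat
      · rw [if_pos ⟨hk1, hk2⟩, if_pos ⟨by omega, hk2⟩]
      · rw [if_neg (by omega), if_neg (by omega), List.getElem?_set_ne (by omega)]
    · rw [if_neg (by omega)]
      by_cases hka : k = a
      · subst hka
        rw [if_pos ⟨le_rfl, by omega⟩, List.getElem?_set_self (by omega)]
      · rw [if_neg (by omega), List.getElem?_set_ne (by omega)]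

-- left column of a row: the padded c1 at index k
lemma pv_left (c1 : List String) (e1 : String) (m : Nat) (k : Nat) (hk : k < c1.length + m) :
    PySem.List.pyGetD (c1 ++ List.replicate m e1) (k : Int) "" =
      if (k : Int) < (c1.length : Int) then PySem.List.pyGetD c1 (k : Int) "" else e1 := by
  rw [PySem.List.pyGetD_natCast, PySem.List.pyGetD_natCast]
  rw [List.getD_eq_getElem?_getD, List.getD_eq_getElem?_getD]
  by_cases h : k < c1.length
  · rw [if_pos (by exact_mod_cast h), List.getElem?_append_left h]
  · rw [if_neg (by exact_mod_cast h), List.getElem?_append_right (by omega)]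
    rw [List.getElem?_replicate, if_pos (by omega)]
    rfl

-- right column of a row: the prepended-and-padded c2 at index k
lemma pv_right (c2 : List String) (e2 : String) (rest : Nat) (offset : Int) (k : Nat)
    (hk : k < offset.toNat + c2.length + rest) :
    PySem.List.pyGetD ((List.replicate offset.toNat e2 ++ c2) ++ List.replicate rest e2) (k : Int) "" =
      if max offset 0 ≤ (k : Int) ∧ (k : Int) < max offset 0 + (c2.length : Int) then
        PySem.List.pyGetD c2 ((k : Int) - max offset 0) "" else e2 := by
  have hmax : max offset 0 = (offset.toNat : Int) := by omega
  rw [hmax, PySem.List.pyGetD_natCast, List.getD_eq_getElem?_getD]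
  by_cases h1 : k < offset.toNat
  · rw [if_neg (by push_cast; omega)]
    rw [List.getElem?_append_left (by simp; omega), List.getElem?_append_left (by simp; omega)]
    rw [List.getElem?_replicate, if_pos h1]
    rfl
  · by_cases h2 : k < offset.toNat + c2.length
    · rw [if_pos (by push_cast; omega)]
      rw [List.getElem?_append_left (by simp; omega)]
      rw [List.getElem?_append_right (by simp; omega)]
      have hc : (k : Int) - (offset.toNat : Int) = ((k - offset.toNat : Nat) : Int) := by push_cast; omega
      rw [hc, PySem.List.pyGetD_natCast, List.getD_eq_getElem?_getD]
      simp
    · rw [if_neg (by push_cast; omega)]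
      rw [List.getElem?_append_right (by simp; omega)]
      rw [List.getElem?_replicate, if_pos (by simp; omega)]
      rfl

-- ===== VERDICT (by name: the statement is the Claim_ definition above) =====
theorem append_col_spec : Claim_equal_append_col := by
  intro c1 c2 offset _ hpre
  unfold Spec_append_col
  by_cases h1 : c1 = []
  · simp [append_col, append_col_alt, h1]
  by_cases h2 : c2 = []
  · simp [append_col, append_col_alt, h1, h2]
  have hl1 : 0 < c1.length := List.length_pos_iff.mpr h1
  have hl2 : 0 < c2.length := List.length_pos_iff.mpr h2
  simp only [append_col, append_col_alt, if_neg h1, if_neg h2]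
  set N : Int := max (c1.length : Int) ((c2.length : Int) + offset) with hN
  have hN1 : (c1.length : Int) ≤ N := le_max_left _ _
  have hN2 : (c2.length : Int) + offset ≤ N := le_max_right _ _
  have heff : (offset.toNat : Int) + (c2.length : Int) ≤ N := by
    rcases hpre with h | h | h | h
    · exact absurd h h1
    · exact absurd h h2
    · omega
    · have : (c2.length : Int) ≤ (c1.length : Int) := by exact_mod_cast h
      omega
  rw [pv_foldl_cons_const]
  rw [PySem.List.length_pyRange_one]
  simp only [sub_zero]
  rw [pvPadWhile_eq, pvPadWhile_eq]
  simp only [List.length_append, List.length_replicate]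
  push_cast
  obtain ⟨hlen, hget⟩ := pv_foldl_set
    (fun i => PySem.List.pyGetD (c1 ++ List.replicate ((N - (c1.length : Int)).toNat)
        (String.ofList (List.replicate (PySem.Str.len (PySem.List.pyGetD c1 0 "")).toNat ' '))) i "")
    (fun i => PySem.List.pyGetD ((List.replicate offset.toNat
        (String.ofList (List.replicate (PySem.Str.len (PySem.List.pyGetD c2 0 "")).toNat ' ')) ++ c2) ++
        List.replicate ((N - ((offset.toNat : Int) + (c2.length : Int))).toNat)
        (String.ofList (List.replicate (PySem.Str.len (PySem.List.pyGetD c2 0 "")).toNat ' '))) i "")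
    N 0 (List.replicate N.toNat "") (by simp)
    (by intro k _ hk; simp [List.getElem?_replicate, hk])
  simp only [Nat.cast_zero] at hlen hget
  apply List.ext_getElem?
  intro k
  rw [hget k]
  by_cases hk : k < N.toNat
  · rw [if_pos ⟨Nat.zero_le k, hk⟩]
    rw [List.getElem?_map, PySem.List.getElem?_pyRange_one]
    rw [if_pos (by omega)]
    simp only [Option.map_some, zero_add]
    congr 1
    rw [pv_empty_append]
    congr 1
    · exact pv_left _ _ _ k (by omega)
    · exact pv_right _ _ _ offset k (by omega)
  · rw [if_neg (by omega)]
    rw [List.getElem?_eq_none (by simp [List.length_replicate]; omega)]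
    rw [List.getElem?_eq_none (by simp [PySem.List.length_pyRange_one]; omega)]
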